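-- pv_equiv track=rewrite | github.com/heyoni/Algorithm_study | programmers/054.py | devide_uv
-- ===== SOURCE A (Python) =====
-- def devide_uv(s):
--     count_l = 0
--     count_r = 0
--     temp = ''
--     for i in range(len(s)):
--         if s[i] == '(':
--             count_l += 1
--         else:
--             count_r += 1
--         if count_l == count_r:
--             return s[:i+1], s[i+1:]
-- ===== SOURCE B (Python) =====
-- def devide_uv(s):
--     # Pass 1: build the full running-balance table; Pass 2: find the first zero.
--     table = []
--     bal = 0
--     for c in s:
--         bal += 1 if c == '(' else -1
--         table.append(bal)
--     if 0 in table: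
--         i = table.index(0)
--         return s[:i+1], s[i+1:]
-- ===== Notes on version B (the rewrite author's own statement) =====
-- stated objective: alternative
-- what changed: B replaces A's fused single scan with two counters and early return by a two-pass decomposition: it first materialises the running-balance table (one signed counter), then locates the first zero with list.index and slices there.
-- outside the precondition, e.g. on devide_uv('((('): A returns None, B returns None; on devide_uv(')'): A returns None, B returns None; on devide_uv(''): A returns None, B returns None
import Mathlib
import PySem

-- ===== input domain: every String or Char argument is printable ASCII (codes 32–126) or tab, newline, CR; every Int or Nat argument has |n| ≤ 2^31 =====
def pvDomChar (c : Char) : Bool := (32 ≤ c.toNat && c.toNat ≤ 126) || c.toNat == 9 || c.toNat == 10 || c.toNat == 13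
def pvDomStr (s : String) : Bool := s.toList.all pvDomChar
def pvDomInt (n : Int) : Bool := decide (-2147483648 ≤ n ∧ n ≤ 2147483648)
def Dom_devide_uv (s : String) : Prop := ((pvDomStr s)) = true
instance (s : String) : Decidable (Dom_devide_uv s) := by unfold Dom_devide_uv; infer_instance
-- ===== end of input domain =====

-- B replaces A's fused scan with two counters by a two-pass decomposition (balance table, then
-- first zero); same O(n) cost, objective "alternative". Return value only (no mutation).

-- ===== PORT A =====
-- A's for-loop over range(len(s)) with counters count_l/count_r and an early return,
-- transcribed as structural recursion over the character list with the running index i.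
def devide_uv_go (s : String) (cs : List Char) (i : Nat) (cl cr : Int) : String × String :=
  match cs with
  | [] => ("", "")   -- loop fell through: Python A returns None here (excluded by Pre_)
  | c :: rest =>
    let cl' := if c = '(' then cl + 1 else cl
    let cr' := if c = '(' then cr else cr + 1
    if cl' = cr' then
      (PySem.Str.slice s none (some ((i + 1 : Nat) : Int)),
       PySem.Str.slice s (some ((i + 1 : Nat) : Int)) none)
    else devide_uv_go s rest (i + 1) cl' cr'

def devide_uv (s : String) : String × String :=
  devide_uv_go s s.toList 0 0 0

-- ===== PORT B =====
-- pass 1 of Source B: the running-balance table (the for-loop with bal and append)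
def pvAltTable : List Char → Int → List Int
  | [], _ => []
  | c :: rest, bal =>
    let b := bal + (if c = '(' then 1 else -1)
    b :: pvAltTable rest b

-- pass 2 of Source B: `if 0 in table: i = table.index(0)` and the two slices
def devide_uv_alt (s : String) : String × String :=
  let table := pvAltTable s.toList 0
  match PySem.List.index? table 0 with
  | some i => (PySem.Str.slice s none (some ((i + 1 : Nat) : Int)),
               PySem.Str.slice s (some ((i + 1 : Nat) : Int)) none)
  | none => ("", "")   -- Python B returns None here (excluded by Pre_)

-- ===== PRECONDITION & SPEC =====
-- Pre_ excludes exactly the strings with no balanced prefix (e.g. "", "(((", ")"): there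
-- Python A falls through its loop and returns None, which is not a value of the pair type.
def Pre_devide_uv (s : String) : Prop :=
  ∃ i ∈ List.range s.toList.length, 2 * ((s.toList.take (i + 1)).count '(') = i + 1

instance (s : String) : Decidable (Pre_devide_uv s) := by unfold Pre_devide_uv; infer_instance

def pvWitness_devide_uv : String := "(())()"

def Spec_devide_uv (s : String) (out : String × String) : Prop := out = devide_uv_alt s
instance (s : String) (out : String × String) : Decidable (Spec_devide_uv s out) := by
  unfold Spec_devide_uv; infer_instance

-- ===== CLAIM (what is proved, stated in full; the proofs are below) =====
def Claim_equal_devide_uv : Prop :=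
  ∀ (s : String), Dom_devide_uv s → Pre_devide_uv s → Spec_devide_uv s (devide_uv s)

-- ===== LEMMAS AND PROOFS =====

-- A's counter loop computes exactly "first zero of the balance table", shifted by the
-- index offset i; the invariant is bal = cl - cr.
theorem devide_uv_go_eq (s : String) :
    ∀ (cs : List Char) (i : Nat) (cl cr : Int),
      devide_uv_go s cs i cl cr =
        match PySem.List.index? (pvAltTable cs (cl - cr)) 0 with
        | some j => (PySem.Str.slice s none (some ((i + j + 1 : Nat) : Int)),
                     PySem.Str.slice s (some ((i + j + 1 : Nat) : Int)) none)
        | none => ("", "") := by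
  intro cs
  induction cs with
  | nil =>
    intro i cl cr
    simp [devide_uv_go, pvAltTable, PySem.List.index?_eq_idxOf?]
  | cons c rest ih =>
    intro i cl cr
    by_cases hc : c = '('
    · by_cases hz : cl + 1 = cr
      · -- balance goes to cl - cr + 1 = 0? only if cl + 1 = cr
        have hb : cl - cr + 1 = 0 := by omega
        simp only [devide_uv_go, pvAltTable, hc, if_true]
        rw [if_pos hz, hb, PySem.List.index?_cons_self]
      · have hb : cl - cr + 1 ≠ 0 := by omega
        simp only [devide_uv_go, pvAltTable, hc, if_true]
        rw [if_neg hz, PySem.List.index?_cons_of_ne _ hb,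
          ih (i + 1) (cl + 1) cr]
        have harg : cl + 1 - cr = cl - cr + 1 := by omega
        rw [harg]
        cases PySem.List.index? (pvAltTable rest (cl - cr + 1)) 0 with
        | none => simp
        | some j =>
          have : i + 1 + j + 1 = i + (j + 1) + 1 := by omega
          simp [this]
    · by_cases hz : cl = cr + 1
      · have hb : cl - cr + -1 = 0 := by omega
        simp only [devide_uv_go, pvAltTable, hc, if_false]
        rw [if_pos (by omega : cl = cr + 1), hb, PySem.List.index?_cons_self]
      · have hb : cl - cr + -1 ≠ 0 := by omega
        simp only [devide_uv_go, pvAltTable, hc, if_false]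
        rw [if_neg (by omega : ¬ cl = cr + 1), PySem.List.index?_cons_of_ne _ hb,
          ih (i + 1) cl (cr + 1)]
        have harg : cl - (cr + 1) = cl - cr + -1 := by omega
        rw [harg]
        cases PySem.List.index? (pvAltTable rest (cl - cr + -1)) 0 with
        | none => simp
        | some j =>
          have : i + 1 + j + 1 = i + (j + 1) + 1 := by omega
          simp [this]

-- ===== VERDICT (by name: the statement is the Claim_ definition above) =====
theorem devide_uv_spec : Claim_equal_devide_uv := by
  intro s _ _
  unfold Spec_devide_uv devide_uv devide_uv_alt
  rw [devide_uv_go_eq]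
  norm_num
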